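-- pv_equiv track=rewrite | github.com/nicolasme/store-server | utils/dmap2/test_write_gcode.py | validate_gcode
-- ===== SOURCE A (Python) =====
-- def validate_gcode(gcode_lines):
--     """
--     Validate that G-code output is reasonable
--
--     Args:
--         gcode_lines (list): List of G-code lines
--
--     Returns:
--         tuple: (is_valid, error_message)
--     """
--     if not gcode_lines:
--         return False, "No G-code generated"
--
--     if not isinstance(gcode_lines, list):
--         return False, "G-code output is not a list"
--
--     # Check for basic G-code structure
--     has_header = False
--     has_moves = False
--     has_end = False
--
--     for line in gcode_lines:
--         if not isinstance(line, str):
--             return False, f"Non-string line in G-code: {type(line)}"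
--
--         line = line.strip()
--         if line.startswith('('):
--             has_header = True
--         elif line.startswith('G0') or line.startswith('G1'):
--             has_moves = True
--         elif line == 'M2':
--             has_end = True
--
--     if not has_header:
--         return False, "No header comments found"
--
--     if not has_moves:
--         return False, "No movement commands found"
--
--     if not has_end:
--         return False, "No program end command (M2) found"
--
--     return True, "Valid G-code structure"
-- ===== SOURCE B (Python) =====
-- def validate_gcode(gcode_lines):
--     if not gcode_lines:
--         return False, "No G-code generated"
--     if not isinstance(gcode_lines, list):
--         return False, "G-code output is not a list"
--     # separate validation pass: first non-string element wins
--     for line in gcode_lines: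
--         if not isinstance(line, str):
--             return False, f"Non-string line in G-code: {type(line)}"
--     stripped = [line.strip() for line in gcode_lines]
--     if not any(l.startswith('(') for l in stripped):
--         return False, "No header comments found"
--     if not any(l.startswith('G0') or l.startswith('G1') for l in stripped):
--         return False, "No movement commands found"
--     if not any(l == 'M2' for l in stripped):
--         return False, "No program end command (M2) found"
--     return True, "Valid G-code structure"
-- ===== Notes on version B (the rewrite author's own statement) =====
-- stated objective: simpler
-- what changed: Replaces the single flag-accumulating loop with elif classification by a validation pass plus three independent any(...) scans over the stripped lines.
import Mathlib
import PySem

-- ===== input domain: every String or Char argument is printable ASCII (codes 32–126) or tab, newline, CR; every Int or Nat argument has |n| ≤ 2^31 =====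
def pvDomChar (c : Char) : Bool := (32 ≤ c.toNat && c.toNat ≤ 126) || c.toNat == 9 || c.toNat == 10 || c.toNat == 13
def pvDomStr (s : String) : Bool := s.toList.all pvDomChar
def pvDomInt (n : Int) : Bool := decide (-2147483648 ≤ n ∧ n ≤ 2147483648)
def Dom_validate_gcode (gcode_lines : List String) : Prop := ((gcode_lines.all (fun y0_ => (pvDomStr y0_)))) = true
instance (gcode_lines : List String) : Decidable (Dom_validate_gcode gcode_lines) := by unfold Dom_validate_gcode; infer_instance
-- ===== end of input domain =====

-- B replaces A's single flag-accumulating loop by three independent any-scans over the stripped lines (objective: simpler).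
-- (Python's isinstance checks are vacuous under the List String type and are not ported.)

-- ===== PORT A =====
-- one step of A's for-loop over (has_header, has_moves, has_end)
def pvStepA (s : Bool × Bool × Bool) (line : String) : Bool × Bool × Bool :=
  let l := PySem.Str.strip line
  if PySem.Str.startswith l "(" then (true, s.2.1, s.2.2)
  else if PySem.Str.startswith l "G0" || PySem.Str.startswith l "G1" then (s.1, true, s.2.2)
  else if l = "M2" then (s.1, s.2.1, true)
  else s

def validate_gcode (gcode_lines : List String) : Bool × String :=
  if gcode_lines = [] then (false, "No G-code generated")
  else
    let st := gcode_lines.foldl pvStepA (false, false, false)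
    if st.1 = false then (false, "No header comments found")
    else if st.2.1 = false then (false, "No movement commands found")
    else if st.2.2 = false then (false, "No program end command (M2) found")
    else (true, "Valid G-code structure")

-- ===== PORT B =====
def validate_gcode_alt (gcode_lines : List String) : Bool × String :=
  if gcode_lines = [] then (false, "No G-code generated")
  else
    let stripped := gcode_lines.map (fun line => PySem.Str.strip line)
    if (stripped.any (fun l => PySem.Str.startswith l "(")) = false then
      (false, "No header comments found")
    else if (stripped.any (fun l => PySem.Str.startswith l "G0" || PySem.Str.startswith l "G1")) = false then
      (false, "No movement commands found")
    else if (stripped.any (fun l => l == "M2")) = false then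
      (false, "No program end command (M2) found")
    else (true, "Valid G-code structure")

-- ===== PRECONDITION & SPEC =====
def Spec_validate_gcode (gcode_lines : List String) (out : Bool × String) : Prop := out = validate_gcode_alt gcode_lines
instance (gcode_lines : List String) (out : Bool × String) : Decidable (Spec_validate_gcode gcode_lines out) := by unfold Spec_validate_gcode; infer_instance

-- ===== CLAIM (what is proved, stated in full; the proofs are below) =====
def Claim_equal_validate_gcode : Prop := ∀ (gcode_lines : List String), Dom_validate_gcode gcode_lines → Spec_validate_gcode gcode_lines (validate_gcode gcode_lines)

-- ===== LEMMAS AND PROOFS =====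

-- A's elif-guarded predicates for the second and third flag
def pvQ2 (l : String) : Bool :=
  !PySem.Str.startswith l "(" && (PySem.Str.startswith l "G0" || PySem.Str.startswith l "G1")
def pvQ3 (l : String) : Bool :=
  !PySem.Str.startswith l "(" && !(PySem.Str.startswith l "G0" || PySem.Str.startswith l "G1") && l == "M2"

lemma pvLitParen : "(".toList = ['('] := rfl
lemma pvLitG0 : "G0".toList = ['G', '0'] := rfl
lemma pvLitG1 : "G1".toList = ['G', '1'] := rfl
lemma pvM2paren : PySem.Chars.startswith ['M', '2'] ['('] = false := rfl
lemma pvM2g0 : PySem.Chars.startswith ['M', '2'] ['G', '0'] = false := rfl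
lemma pvM2g1 : PySem.Chars.startswith ['M', '2'] ['G', '1'] = false := rfl

lemma foldA_flags (ls : List String) (a b c : Bool) :
    ls.foldl pvStepA (a, b, c) =
      (a || ls.any (fun x => PySem.Str.startswith (PySem.Str.strip x) "("),
       b || ls.any (fun x => pvQ2 (PySem.Str.strip x)),
       c || ls.any (fun x => pvQ3 (PySem.Str.strip x))) := by
  induction ls generalizing a b c with
  | nil => simp
  | cons hd tl ih =>
    simp only [List.foldl_cons, List.any_cons, pvStepA]
    split_ifs with h1 h2 h3
    · simp only [PySem.Str.startswith_eq, PySem.Str.toList_strip, pvLitParen] at h1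
      rw [ih]
      simp [pvQ2, pvQ3, h1]
    · simp only [PySem.Str.startswith_eq, PySem.Str.toList_strip, pvLitParen, pvLitG0, pvLitG1] at h1 h2
      rw [ih]
      simp [pvQ2, pvQ3, h1, h2]
    · simp only [PySem.Str.startswith_eq, PySem.Str.toList_strip, pvLitParen, pvLitG0, pvLitG1] at h1 h2
      rw [ih]
      simp [pvQ2, pvQ3, h1, h2, h3, pvM2paren, pvM2g0, pvM2g1]
    · simp only [PySem.Str.startswith_eq, PySem.Str.toList_strip, pvLitParen, pvLitG0, pvLitG1] at h1 h2
      rw [ih]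
      simp [pvQ2, pvQ3, h1, h2, beq_eq_false_iff_ne.mpr h3]

-- a line starting with "G0"/"G1" does not start with "("
lemma sw_G_not_paren (cs : List Char)
    (h : PySem.Chars.startswith cs ['G', '0'] = true ∨ PySem.Chars.startswith cs ['G', '1'] = true) :
    PySem.Chars.startswith cs ['('] = false := by
  rcases h with h | h <;>
  · rw [PySem.Chars.startswith_iff] at h
    rcases h with ⟨t, ht⟩
    subst ht
    rw [← Bool.not_eq_true, PySem.Chars.startswith_iff]
    simp

lemma q2_eq (l : String) :
    pvQ2 l = (PySem.Str.startswith l "G0" || PySem.Str.startswith l "G1") := by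
  unfold pvQ2
  cases hB : (PySem.Str.startswith l "G0" || PySem.Str.startswith l "G1") with
  | false => simp [hB]
  | true =>
    have hp : PySem.Chars.startswith l.toList ['('] = false := by
      simp only [PySem.Str.startswith_eq, pvLitG0, pvLitG1] at hB
      exact sw_G_not_paren _ (by simpa using hB)
    simp [hB, hp]

-- the line "M2" starts with neither "(" nor "G0"/"G1"
lemma q3_eq (l : String) : pvQ3 l = (l == "M2") := by
  unfold pvQ3
  by_cases h : l = "M2"
  · subst h; decide
  · simp [h]

theorem validate_gcode_eq_alt (gcode_lines : List String) :
    validate_gcode gcode_lines = validate_gcode_alt gcode_lines := by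
  unfold validate_gcode validate_gcode_alt
  by_cases he : gcode_lines = []
  · simp [he]
  · simp only [he, if_false]
    rw [foldA_flags]
    simp only [Bool.false_or, List.any_map, Function.comp_def]
    have h2 : (gcode_lines.any fun x => pvQ2 (PySem.Str.strip x)) =
        (gcode_lines.any fun x => PySem.Str.startswith (PySem.Str.strip x) "G0"
          || PySem.Str.startswith (PySem.Str.strip x) "G1") := by
      apply congrArg; funext x; exact q2_eq _
    have h3 : (gcode_lines.any fun x => pvQ3 (PySem.Str.strip x)) =
        (gcode_lines.any fun x => PySem.Str.strip x == "M2") := by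
      apply congrArg; funext x; exact q3_eq _
    rw [h2, h3]

-- ===== VERDICT (by name: the statement is the Claim_ definition above) =====
theorem validate_gcode_spec : Claim_equal_validate_gcode := by
  intro gcode_lines _
  exact validate_gcode_eq_alt gcode_lines
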